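-- pv_equiv track=rewrite | github.com/LRangg/MimoTree | AA_cluster_scoring.py | initial_clusters
-- ===== SOURCE A (Python) =====
-- def cluster_BFS(node0, seed_graph):
--     queue, order = [], []
--     queue.append(node0)
--     order.append(node0)
--     while queue:
--         v = queue.pop(0)
--         for w in seed_graph[v]:
--             if w not in order:
--                 order.append(w)
--                 queue.append(w)
--     return order
--
-- def cluster_remove_duplicates(seed_lists, sets):
--     res_sets = []
--     res_idx = []
--     for i in range(len(sets)):
--         if sets[i] in res_sets:
--             res_idx.append(i)
--         if sets[i] not in res_sets:
--             res_sets.append(sets[i])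
--     for idx in sorted(res_idx, reverse=True):
--         del seed_lists[idx]
--     return seed_lists, res_sets
--
-- def cluster_remove_subsets(seed_lists, res_sets):
--     remove_idx = []
--     k = 0
--     j = 0
--     while j < len(res_sets):
--         k = j + 1
--         while k < len(res_sets):
--             if res_sets[j].issubset(res_sets[k]) == True:
--                 remove_idx.append(j)
--             if res_sets[k].issubset(res_sets[j]) == True:
--                 remove_idx.append(k)
--             k = k + 1
--         j = j + 1
--     #find the idx of the subsets needed to be removed
--     res_remove_idx = []
--     for idx in remove_idx:
--         if idx not in res_remove_idx:
--             res_remove_idx.append(idx)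
--     #remove duplicates from remove_idx
--     res_remove_idx.sort(reverse=True)
--     #sort res_remove_idx, values in reverse order
--     for indx in res_remove_idx:
--         del seed_lists[indx]
--     #remove subsets from seed_lists
--     return(seed_lists)
--
-- def cluster_lists_sets(seed_graph):
--     sets = []
--     seed_lists = []
--     for key in seed_graph.keys():
--         seed_lists.append(cluster_BFS(key, seed_graph))
--     for seed_list in seed_lists:
--         sets.append(set(seed_list))
--     return seed_lists, sets
--
-- def initial_clusters(all_seeds_list):
--     cluster_graph = {n:[] for n in range(len(all_seeds_list))}
--     for i in range(len(all_seeds_list)-1):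
--         seed_i = [x[2:] for x in all_seeds_list[i]]
--         set_i = set(seed_i)
--         for j in range(i+1, len(all_seeds_list)):
--             seed_j = [y[2:] for y in all_seeds_list[j]]
--             set_j = set(seed_j)
--             if len(list(set_i.intersection(set_j))) >= 2:
--                 cluster_graph[i].append(j)
--     cluster_lists, cluster_sets = cluster_lists_sets(cluster_graph)
--     cluster_lists, res_cluster_sets = cluster_remove_duplicates(cluster_lists, cluster_sets)
--     cluster_lists = cluster_remove_subsets(cluster_lists, res_cluster_sets)
--     ini_clusters = []
--     for l in range(len(cluster_lists)):
--         clusterl = []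
--         for e in cluster_lists[l]:
--             for w in all_seeds_list[e]:
--                 w = w[2:]
--                 if w not in clusterl:
--                     clusterl.append(w)
--         ini_clusters.append(clusterl)
--     return ini_clusters
-- ===== SOURCE B (Python) =====
-- # Edge-building rewritten: an inverted index with per-bucket pair counting replaces
-- # the pairwise set intersections; the downstream BFS/dedup/subset/flatten phases are
-- # kept exactly as in the original.
-- def cluster_BFS(node0, seed_graph):
--     queue, order = [], []
--     queue.append(node0)
--     order.append(node0)
--     while queue:
--         v = queue.pop(0)
--         for w in seed_graph[v]:
--             if w not in order:
--                 order.append(w)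
--                 queue.append(w)
--     return order
--
-- def cluster_remove_duplicates(seed_lists, sets):
--     res_sets = []
--     res_idx = []
--     for i in range(len(sets)):
--         if sets[i] in res_sets:
--             res_idx.append(i)
--         if sets[i] not in res_sets:
--             res_sets.append(sets[i])
--     for idx in sorted(res_idx, reverse=True):
--         del seed_lists[idx]
--     return seed_lists, res_sets
--
-- def cluster_remove_subsets(seed_lists, res_sets):
--     remove_idx = []
--     k = 0
--     j = 0
--     while j < len(res_sets):
--         k = j + 1
--         while k < len(res_sets):
--             if res_sets[j].issubset(res_sets[k]) == True:
--                 remove_idx.append(j)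
--             if res_sets[k].issubset(res_sets[j]) == True:
--                 remove_idx.append(k)
--             k = k + 1
--         j = j + 1
--     res_remove_idx = []
--     for idx in remove_idx:
--         if idx not in res_remove_idx:
--             res_remove_idx.append(idx)
--     res_remove_idx.sort(reverse=True)
--     for indx in res_remove_idx:
--         del seed_lists[indx]
--     return(seed_lists)
--
-- def cluster_lists_sets(seed_graph):
--     sets = []
--     seed_lists = []
--     for key in seed_graph.keys():
--         seed_lists.append(cluster_BFS(key, seed_graph))
--     for seed_list in seed_lists:
--         sets.append(set(seed_list))
--     return seed_lists, sets
--
-- def initial_clusters(all_seeds_list):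
--     n = len(all_seeds_list)
--     cluster_graph = {m: [] for m in range(n)}
--     # inverted index: trimmed element -> ascending list of seed indices containing it
--     index = {}
--     for i in range(n):
--         for t in dict.fromkeys(x[2:] for x in all_seeds_list[i]):
--             index.setdefault(t, []).append(i)
--     # count, for each ordered pair i < j, the distinct elements they share
--     cnt = {}
--     for bucket in index.values():
--         work = list(bucket)
--         while work:
--             i = work.pop(0)
--             for j in work:
--                 cnt[(i, j)] = cnt.get((i, j), 0) + 1
--     for i in range(n):
--         for j in range(i + 1, n):
--             if cnt.get((i, j), 0) >= 2:
--                 cluster_graph[i].append(j)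
--     cluster_lists, cluster_sets = cluster_lists_sets(cluster_graph)
--     cluster_lists, res_cluster_sets = cluster_remove_duplicates(cluster_lists, cluster_sets)
--     cluster_lists = cluster_remove_subsets(cluster_lists, res_cluster_sets)
--     ini_clusters = []
--     for l in range(len(cluster_lists)):
--         clusterl = []
--         for e in cluster_lists[l]:
--             for w in all_seeds_list[e]:
--                 w = w[2:]
--                 if w not in clusterl:
--                     clusterl.append(w)
--         ini_clusters.append(clusterl)
--     return ini_clusters
-- ===== Notes on version B (the rewrite author's own statement) =====
-- stated objective: alternative
-- what changed: The edge-building phase no longer recomputes and intersects the trimmed-element sets for every pair of seeds: B builds an inverted index (element -> ascending seed indices) once and counts, per index bucket, the co-occurrences of each ordered pair i<j, then emits the identical forward-edge graph; the BFS/dedup/subset/flatten phases are unchanged.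
import Mathlib
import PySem

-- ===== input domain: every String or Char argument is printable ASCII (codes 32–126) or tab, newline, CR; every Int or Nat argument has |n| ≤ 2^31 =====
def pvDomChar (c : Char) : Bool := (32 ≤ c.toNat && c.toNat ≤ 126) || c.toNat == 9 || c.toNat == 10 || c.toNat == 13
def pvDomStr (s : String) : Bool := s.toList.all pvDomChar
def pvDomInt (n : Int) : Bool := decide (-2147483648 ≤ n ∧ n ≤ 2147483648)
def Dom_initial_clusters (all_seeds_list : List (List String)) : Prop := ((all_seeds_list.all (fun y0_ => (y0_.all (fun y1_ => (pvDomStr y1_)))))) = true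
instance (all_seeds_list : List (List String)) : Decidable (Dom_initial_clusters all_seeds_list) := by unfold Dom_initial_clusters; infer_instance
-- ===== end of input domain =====

-- B replaces the pairwise set-intersection edge-building by an inverted index with
-- per-bucket pair counting (objective: an alternative edge-building algorithm producing
-- the identical graph); all downstream phases of the pipeline (BFS, duplicate removal,
-- subset removal, flatten) are shared verbatim by the two Pythons and so by both ports.

-- ===== SHARED HELPERS (functions Source B copies verbatim from A) =====

-- x[2:]
def pvTrim (x : String) : String := PySem.Str.slice x (some 2) none

-- the while-loop of cluster_BFS; fuel = keys+1 suffices on every state reached from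
-- initial_clusters (each pop consumes a distinct key, see comment at cluster_BFS);
-- seed_graph[v] would raise KeyError on a missing key — unreachable here, getD [] is
-- exact on all reached states.
def cluster_BFS_loop (g : PySem.Dict Int (List Int)) : Nat → List Int → List Int → List Int
  | 0, _, order => order
  | _ + 1, [], order => order
  | fuel + 1, v :: qs, order =>
    let p := ((g.get? v).getD []).foldl
      (fun (p : List Int × List Int) w => if w ∈ p.1 then p else (p.1 ++ [w], p.2 ++ [w]))
      (order, qs)
    cluster_BFS_loop g fuel p.2 p.1

-- cluster_BFS: every queued node is a distinct key of seed_graph (node0 and all edge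
-- targets are keys in the graphs initial_clusters builds), so the while loop pops at
-- most keys-many nodes: keys+1 fuel never runs out on reachable inputs.
def cluster_BFS (node0 : Int) (seed_graph : PySem.Dict Int (List Int)) : List Int :=
  cluster_BFS_loop seed_graph (seed_graph.keys.length + 1) [node0] [node0]

-- Python 'x in list-of-sets' / set equality is PySem.Set.equal; del seed_lists[idx] is
-- eraseIdx (idx is a nonnegative in-range position on every reachable call).
def cluster_remove_duplicates (seed_lists : List (List Int)) (sets : List (PySem.Set Int)) :
    List (List Int) × List (PySem.Set Int) :=
  let rr := (PySem.List.pyRange 0 (PySem.List.len sets)).foldl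
    (fun (p : List (PySem.Set Int) × List Int) i =>
      let s := PySem.List.pyGetD sets i []
      let p := if p.1.any (fun t => PySem.Set.equal t s) then (p.1, p.2 ++ [i]) else p
      if p.1.any (fun t => PySem.Set.equal t s) then p else (p.1 ++ [s], p.2))
    ([], [])
  ((PySem.List.sorted rr.2 (fun x => x) true).foldl (fun l idx => l.eraseIdx idx.toNat) seed_lists,
   rr.1)

def cluster_remove_subsets (seed_lists : List (List Int)) (res_sets : List (PySem.Set Int)) :
    List (List Int) :=
  let remove_idx := (PySem.List.pyRange 0 (PySem.List.len res_sets)).foldl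
    (fun acc j => (PySem.List.pyRange (j + 1) (PySem.List.len res_sets)).foldl
      (fun acc k =>
        let acc := if PySem.Set.issubset (PySem.List.pyGetD res_sets j [])
            (PySem.List.pyGetD res_sets k []) then acc ++ [j] else acc
        if PySem.Set.issubset (PySem.List.pyGetD res_sets k [])
            (PySem.List.pyGetD res_sets j []) then acc ++ [k] else acc)
      acc)
    ([] : List Int)
  let res_remove_idx := remove_idx.foldl (fun r idx => if idx ∈ r then r else r ++ [idx]) []
  (PySem.List.sorted res_remove_idx (fun x => x) true).foldl
    (fun l idx => l.eraseIdx idx.toNat) seed_lists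

def cluster_lists_sets (seed_graph : PySem.Dict Int (List Int)) :
    List (List Int) × List (PySem.Set Int) :=
  let seed_lists := seed_graph.keys.foldl (fun acc k => acc ++ [cluster_BFS k seed_graph]) []
  (seed_lists, seed_lists.foldl (fun acc l => acc ++ [PySem.Set.ofList l]) [])

-- ===== PORT A =====

def initial_clusters (all_seeds_list : List (List String)) : List (List String) :=
  let cluster_graph : PySem.Dict Int (List Int) :=
    (PySem.List.pyRange 0 (PySem.List.len all_seeds_list)).foldl
      (fun d m => d.insert m []) PySem.Dict.empty
  let cluster_graph :=
    (PySem.List.pyRange 0 (PySem.List.len all_seeds_list - 1)).foldl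
      (fun d i =>
        let set_i := PySem.Set.ofList ((PySem.List.pyGetD all_seeds_list i []).map pvTrim)
        (PySem.List.pyRange (i + 1) (PySem.List.len all_seeds_list)).foldl
          (fun d j =>
            let set_j := PySem.Set.ofList ((PySem.List.pyGetD all_seeds_list j []).map pvTrim)
            -- cluster_graph[i].append(j): key i is always present, modify is exact
            if 2 ≤ (PySem.Set.inter set_i set_j).length then d.modify i [] (fun l => l ++ [j])
            else d)
          d)
      cluster_graph
  let cl := cluster_lists_sets cluster_graph
  let cd := cluster_remove_duplicates cl.1 cl.2
  let cluster_lists := cluster_remove_subsets cd.1 cd.2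
  (PySem.List.pyRange 0 (PySem.List.len cluster_lists)).foldl
    (fun out l =>
      let clusterl := (PySem.List.pyGetD cluster_lists l []).foldl
        (fun cl e => (PySem.List.pyGetD all_seeds_list e []).foldl
          (fun cl w => let w2 := pvTrim w; if w2 ∈ cl then cl else cl ++ [w2]) cl)
        []
      out ++ [clusterl])
    []

-- ===== PORT B =====

-- Source B: work = list(bucket); while work: i = work.pop(0); for j in work: cnt[(i,j)] += 1
def pvCntBucket : List Int → PySem.Dict (Int × Int) Int → PySem.Dict (Int × Int) Int
  | [], cnt => cnt
  | i :: work, cnt =>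
    pvCntBucket work (work.foldl (fun d j => d.insert (i, j) (d.getD (i, j) 0 + 1)) cnt)

def initial_clusters_alt (all_seeds_list : List (List String)) : List (List String) :=
  let n : Int := PySem.List.len all_seeds_list
  let cluster_graph : PySem.Dict Int (List Int) :=
    (PySem.List.pyRange 0 n).foldl (fun d m => d.insert m []) PySem.Dict.empty
  -- dict.fromkeys(gen) is PySem.List.dedup; index.setdefault(t, []).append(i) is
  -- modify t [] (· ++ [i]) (append the value at t, inserting key t at the end if new)
  let index : PySem.Dict String (List Int) :=
    (PySem.List.pyRange 0 n).foldl
      (fun d i => (PySem.List.dedup ((PySem.List.pyGetD all_seeds_list i []).map pvTrim)).foldl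
        (fun d t => d.modify t [] (fun b => b ++ [i])) d)
      PySem.Dict.empty
  let cnt : PySem.Dict (Int × Int) Int :=
    index.values.foldl (fun c bucket => pvCntBucket bucket c) PySem.Dict.empty
  let cluster_graph :=
    (PySem.List.pyRange 0 n).foldl
      (fun d i => (PySem.List.pyRange (i + 1) n).foldl
        (fun d j =>
          if 2 ≤ cnt.getD (i, j) 0 then d.modify i [] (fun l => l ++ [j]) else d)
        d)
      cluster_graph
  let cl := cluster_lists_sets cluster_graph
  let cd := cluster_remove_duplicates cl.1 cl.2
  let cluster_lists := cluster_remove_subsets cd.1 cd.2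
  (PySem.List.pyRange 0 (PySem.List.len cluster_lists)).foldl
    (fun out l =>
      let clusterl := (PySem.List.pyGetD cluster_lists l []).foldl
        (fun cl e => (PySem.List.pyGetD all_seeds_list e []).foldl
          (fun cl w => let w2 := pvTrim w; if w2 ∈ cl then cl else cl ++ [w2]) cl)
        []
      out ++ [clusterl])
    []

-- ===== PRECONDITION & SPEC =====

def Spec_initial_clusters (all_seeds_list : List (List String)) (out : List (List String)) : Prop :=
  out = initial_clusters_alt all_seeds_list
instance (all_seeds_list : List (List String)) (out : List (List String)) :
    Decidable (Spec_initial_clusters all_seeds_list out) := by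
  unfold Spec_initial_clusters; infer_instance

-- ===== CLAIM (what is proved, stated in full; the proofs are below) =====

def Claim_equal_initial_clusters : Prop :=
  ∀ (all_seeds_list : List (List String)), Dom_initial_clusters all_seeds_list →
    Spec_initial_clusters all_seeds_list (initial_clusters all_seeds_list)

-- ===== LEMMAS AND PROOFS =====

-- proof-side abbreviations for the two edge-building phases and the shared tail

def pvSS (asl : List (List String)) (i : Int) : PySem.Set String :=
  PySem.Set.ofList ((PySem.List.pyGetD asl i []).map pvTrim)

def pvGA (asl : List (List String)) : PySem.Dict Int (List Int) :=
  (PySem.List.pyRange 0 (PySem.List.len asl - 1)).foldl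
    (fun d i =>
      (PySem.List.pyRange (i + 1) (PySem.List.len asl)).foldl
        (fun d j =>
          if 2 ≤ (PySem.Set.inter (pvSS asl i) (pvSS asl j)).length then
            d.modify i [] (fun l => l ++ [j])
          else d)
        d)
    ((PySem.List.pyRange 0 (PySem.List.len asl)).foldl
      (fun d m => d.insert m []) PySem.Dict.empty)

def pvIndex (asl : List (List String)) : PySem.Dict String (List Int) :=
  (PySem.List.pyRange 0 (PySem.List.len asl)).foldl
    (fun d i => (PySem.List.dedup ((PySem.List.pyGetD asl i []).map pvTrim)).foldl
      (fun d t => d.modify t [] (fun b => b ++ [i])) d)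
    PySem.Dict.empty

def pvCnt (asl : List (List String)) : PySem.Dict (Int × Int) Int :=
  (pvIndex asl).values.foldl (fun c bucket => pvCntBucket bucket c) PySem.Dict.empty

def pvGB (asl : List (List String)) : PySem.Dict Int (List Int) :=
  (PySem.List.pyRange 0 (PySem.List.len asl)).foldl
    (fun d i =>
      (PySem.List.pyRange (i + 1) (PySem.List.len asl)).foldl
        (fun d j =>
          if 2 ≤ (pvCnt asl).getD (i, j) 0 then d.modify i [] (fun l => l ++ [j]) else d)
        d)
    ((PySem.List.pyRange 0 (PySem.List.len asl)).foldl
      (fun d m => d.insert m []) PySem.Dict.empty)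

def pvTail (asl : List (List String)) (g : PySem.Dict Int (List Int)) : List (List String) :=
  let cl := cluster_lists_sets g
  let cd := cluster_remove_duplicates cl.1 cl.2
  let cluster_lists := cluster_remove_subsets cd.1 cd.2
  (PySem.List.pyRange 0 (PySem.List.len cluster_lists)).foldl
    (fun out l =>
      let clusterl := (PySem.List.pyGetD cluster_lists l []).foldl
        (fun cl e => (PySem.List.pyGetD asl e []).foldl
          (fun cl w => let w2 := pvTrim w; if w2 ∈ cl then cl else cl ++ [w2]) cl)
        []
      out ++ [clusterl])
    []

theorem pvA_eq_tail (asl : List (List String)) :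
    initial_clusters asl = pvTail asl (pvGA asl) := rfl

theorem pvB_eq_tail (asl : List (List String)) :
    initial_clusters_alt asl = pvTail asl (pvGB asl) := rfl

-- element-indexed pair list behind the inverted index
def pvP (asl : List (List String)) : List (String × Int) :=
  (PySem.List.pyRange 0 (PySem.List.len asl)).flatMap
    (fun i => (pvSS asl i).map (fun t => (t, i)))

def pvPairsOf : List Int → List (Int × Int)
  | [] => []
  | i :: w => w.map (fun j => (i, j)) ++ pvPairsOf w

theorem pvSL1 (elems : List String) (hn : elems.Nodup) (i : Int)
    (d : PySem.Dict String (List Int)) (t : String) :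
    (elems.foldl (fun d t' => d.modify t' [] (fun b => b ++ [i])) d).getD t []
      = d.getD t [] ++ (if t ∈ elems then [i] else []) := by
  have h1 : elems.foldl (fun d t' => d.modify t' [] (fun b => b ++ [i])) d
      = (elems.map (fun t' => (t', i))).foldl
          (fun d p => d.modify p.1 [] (fun b => b ++ [p.2])) d := by
    rw [List.foldl_map]
  rw [h1, PySem.Dict.getD_foldl_modify_append]
  congr 1
  have h2 : (elems.map (fun t' => (t', i))).filter (fun p => p.1 == t)
      = (elems.filter (fun t' => t' == t)).map (fun t' => (t', i)) := by
    rw [List.filter_map]; rfl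
  rw [h2, List.filter_beq]
  by_cases h : t ∈ elems
  · rw [List.count_eq_one_of_mem hn h]; simp [h]
  · rw [List.count_eq_zero_of_not_mem h]; simp [h]

theorem pvSL2 (asl : List (List String)) (is : List Int)
    (d : PySem.Dict String (List Int)) (t : String) :
    (is.foldl (fun d i => (PySem.List.dedup ((PySem.List.pyGetD asl i []).map pvTrim)).foldl
        (fun d t' => d.modify t' [] (fun b => b ++ [i])) d) d).getD t []
      = d.getD t [] ++ is.filter (fun i => decide (t ∈ pvSS asl i)) := by
  induction is generalizing d with
  | nil => simp
  | cons i is ih =>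
    rw [List.foldl_cons, ih, pvSL1 _ (by rw [PySem.List.dedup_eq_ofList]; exact PySem.Set.nodup_ofList _) i d t,
      List.filter_cons, List.append_assoc]
    congr 1
    rw [PySem.List.dedup_eq_ofList]
    by_cases h : t ∈ pvSS asl i
    · simp only [pvSS] at h ⊢
      rw [if_pos h, if_pos (by simpa using h)]
      rfl
    · simp only [pvSS] at h ⊢
      rw [if_neg h, if_neg (by simpa using h)]
      rfl

theorem pv_index_bucket (asl : List (List String)) (t : String) :
    (pvIndex asl).getD t []
      = (PySem.List.pyRange 0 (PySem.List.len asl)).filter (fun i => decide (t ∈ pvSS asl i)) := by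
  rw [pvIndex, pvSL2]
  simp

theorem pvCntBucket_eq (b : List Int) (c : PySem.Dict (Int × Int) Int) :
    pvCntBucket b c
      = (pvPairsOf b).foldl (fun d p => d.insert p (d.getD p 0 + 1)) c := by
  induction b generalizing c with
  | nil => rfl
  | cons i w ih =>
    rw [pvCntBucket, pvPairsOf, List.foldl_append, List.foldl_map, ih]

theorem pv_cnt_count (asl : List (List String)) (v : Int × Int) :
    (pvCnt asl).getD v 0
      = ((pvIndex asl).values.flatMap pvPairsOf).count v := by
  rw [pvCnt, PySem.List.foldl_congr_mem _ _ (fun c b => (pvPairsOf b).foldl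
        (fun d p => d.insert p (d.getD p 0 + 1)) c) _ (fun c b _ => pvCntBucket_eq b c),
    ← List.foldl_flatMap, PySem.Dict.getD_foldl_insert_add_one]
  simp

theorem pvIndex_eq_flat (asl : List (List String)) :
    pvIndex asl = (pvP asl).foldl (fun d p => d.modify p.1 [] (fun b => b ++ [p.2]))
      PySem.Dict.empty := by
  rw [pvIndex, pvP, List.foldl_flatMap]
  apply PySem.List.foldl_congr_mem
  intro acc i _
  rw [List.foldl_map, PySem.List.dedup_eq_ofList]
  rfl

theorem pvIndex_keys (asl : List (List String)) :
    (pvIndex asl).keys = PySem.Set.ofList ((pvP asl).map (·.1)) := by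
  rw [pvIndex_eq_flat]
  rw [PySem.Dict.keys_foldl_modify_key (pvP asl) Prod.fst [] (fun _ p => fun b => b ++ [p.2])]
  simp [PySem.Set.update_nil_left]

theorem pv_count_pairsOf (i j : Int) (hij : i < j) :
    ∀ (b : List Int), b.Pairwise (· < ·) →
      (pvPairsOf b).count (i, j) = (if i ∈ b ∧ j ∈ b then 1 else 0) := by
  intro b hb
  induction b with
  | nil => simp [pvPairsOf]
  | cons x w ih =>
    have hx : ∀ y ∈ w, x < y := (List.pairwise_cons.mp hb).1
    have hw : w.Pairwise (· < ·) := (List.pairwise_cons.mp hb).2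
    have hnd : w.Nodup := hw.imp (fun h => ne_of_lt h)
    rw [pvPairsOf, List.count_append, ih hw]
    by_cases hxi : x = i
    · subst hxi
      have hcm : (w.map (fun j => (x, j))).count (x, j) = w.count j := by
        exact List.count_map_of_injective w (fun j => (x, j))
          (fun a b h => by simpa using h) j
      rw [hcm]
      have hjx : j ≠ x := by omega
      have hxw : x ∉ w := fun hm => absurd (hx _ hm) (lt_irrefl x)
      by_cases hj : j ∈ w
      · rw [List.count_eq_one_of_mem hnd hj]
        simp [hj, hjx, hxw]
      · rw [List.count_eq_zero_of_not_mem hj]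
        simp [hj, hjx, hxw]
    · have hcm : (w.map (fun j => (x, j))).count (i, j) = 0 := by
        rw [List.count_eq_zero]
        intro hm
        obtain ⟨y, _, hy⟩ := List.mem_map.mp hm
        exact hxi (by simpa using congrArg Prod.fst hy)
      rw [hcm]
      by_cases hiw : i ∈ w
      · have hjw' : j ≠ x := by
          intro h; subst h; exact absurd (hx _ hiw) (by omega)
        simp [hiw, Ne.symm hxi, hjw']
      · simp [hiw, Ne.symm hxi]

theorem pv_range_pairwise (asl : List (List String)) :
    (PySem.List.pyRange 0 (PySem.List.len asl)).Pairwise (· < ·) := by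
  rw [PySem.List.len_eq, PySem.List.pyRange_zero_natCast]
  exact List.pairwise_lt_range.map _ (fun a b h => by exact_mod_cast h)

theorem pv_mem_keys_of_mem_SS (asl : List (List String)) {t : String} {i : Int}
    (h0 : 0 ≤ i) (hn : i < PySem.List.len asl) (h : t ∈ pvSS asl i) :
    t ∈ PySem.Set.ofList ((pvP asl).map (·.1)) := by
  rw [PySem.Set.mem_ofList, List.mem_map]
  refine ⟨(t, i), ?_, rfl⟩
  rw [pvP, List.mem_flatMap]
  exact ⟨i, PySem.List.mem_pyRange_one.mpr ⟨h0, hn⟩, List.mem_map.mpr ⟨t, h, rfl⟩⟩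

theorem pv_cnt_inter (asl : List (List String)) (i j : Int)
    (h0 : 0 ≤ i) (hij : i < j) (hj : j < PySem.List.len asl) :
    (pvCnt asl).getD (i, j) 0
      = ((PySem.Set.inter (pvSS asl i) (pvSS asl j)).length : Int) := by
  have hnd : (pvIndex asl).keys.Nodup := by
    rw [pvIndex_keys]; exact PySem.Set.nodup_ofList _
  rw [pv_cnt_count, PySem.Dict.values_eq_map_keys _ hnd [], List.count_flatMap, List.map_map]
  have hmap : (pvIndex asl).keys.map ((List.count (i, j) ∘ pvPairsOf) ∘ fun k => (pvIndex asl).getD k [])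
      = (pvIndex asl).keys.map
          (fun t => if t ∈ pvSS asl i ∧ t ∈ pvSS asl j then 1 else 0) := by
    apply List.map_congr_left
    intro t _
    show List.count (i, j) (pvPairsOf ((pvIndex asl).getD t [])) = _
    rw [pv_index_bucket]
    rw [pv_count_pairsOf i j hij _ ((pv_range_pairwise asl).filter _)]
    have hmem : ∀ k : Int, 0 ≤ k → k < PySem.List.len asl →
        (k ∈ (PySem.List.pyRange 0 (PySem.List.len asl)).filter
            (fun i => decide (t ∈ pvSS asl i)) ↔ t ∈ pvSS asl k) := by
      intro k hk0 hkn
      have hkn' : k < (asl.length : Int) := by rwa [PySem.List.len_eq] at hkn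
      rw [List.mem_filter]
      simp [PySem.List.mem_pyRange_one, hk0, hkn']
    rw [if_congr (by rw [hmem i h0 (lt_trans hij hj), hmem j (by omega) hj]) rfl rfl]
  rw [hmap]
  have : ((pvIndex asl).keys.map
        (fun t => if t ∈ pvSS asl i ∧ t ∈ pvSS asl j then (1:ℕ) else 0)).sum
      = (pvIndex asl).keys.countP (fun t => decide (t ∈ pvSS asl i) && decide (t ∈ pvSS asl j)) := by
    rw [← PySem.List.sum_map_ite_one_zero_nat]
    apply congrArg List.sum
    apply List.map_congr_left
    intro t _
    by_cases h1 : t ∈ pvSS asl i <;> by_cases h2 : t ∈ pvSS asl j <;> simp [h1, h2]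
  rw [this, List.countP_eq_length_filter]
  have hperm : List.Perm
      ((pvIndex asl).keys.filter (fun t => decide (t ∈ pvSS asl i) && decide (t ∈ pvSS asl j)))
      (PySem.Set.inter (pvSS asl i) (pvSS asl j)) := by
    have hssnd : (pvSS asl i).Nodup := by rw [pvSS]; exact PySem.Set.nodup_ofList _
    rw [List.perm_ext_iff_of_nodup (hnd.filter _) (PySem.Set.nodup_inter _ _ hssnd)]
    intro t
    rw [List.mem_filter, PySem.Set.mem_inter]
    constructor
    · rintro ⟨-, h⟩
      simp only [Bool.and_eq_true, decide_eq_true_eq] at h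
      exact h
    · rintro ⟨h1, h2⟩
      refine ⟨?_, by simp [h1, h2]⟩
      rw [pvIndex_keys]
      exact pv_mem_keys_of_mem_SS asl h0 (lt_trans hij hj) h1
  rw [hperm.length_eq]

theorem pv_graph_eq (asl : List (List String)) : pvGA asl = pvGB asl := by
  match asl with
  | [] => decide
  | a :: rest =>
    set asl := a :: rest with hasl
    have hpos : 1 ≤ PySem.List.len asl := by
      rw [PySem.List.len_eq, hasl]
      simp
    have hsplit : PySem.List.pyRange 0 (PySem.List.len asl)
        = PySem.List.pyRange 0 (PySem.List.len asl - 1) ++ [PySem.List.len asl - 1] := by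
      have h1 : PySem.List.len asl = (PySem.List.len asl - 1) + 1 := by omega
      rw [h1, PySem.List.pyRange_one_succ_right (by omega)]
      norm_num
    have hlast : PySem.List.pyRange (PySem.List.len asl - 1 + 1) (PySem.List.len asl) = [] := by
      rw [List.eq_nil_iff_forall_not_mem]
      intro x hx
      have := PySem.List.mem_pyRange_one.mp hx
      omega
    rw [pvGA, pvGB]
    set d0 := (PySem.List.pyRange 0 (PySem.List.len asl)).foldl
      (fun d m => d.insert m []) PySem.Dict.empty with hd0
    rw [hsplit, List.foldl_append]
    simp only [List.foldl_cons, List.foldl_nil, hlast]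
    apply PySem.List.foldl_congr_mem
    intro acc i hi
    have hib := PySem.List.mem_pyRange_one.mp hi
    apply PySem.List.foldl_congr_mem
    intro acc2 j hjmem
    have hjb := PySem.List.mem_pyRange_one.mp hjmem
    have hcnt := pv_cnt_inter asl i j (by omega) (by omega) (by omega)
    rw [hcnt]
    have hiff : (2 ≤ ((PySem.Set.inter (pvSS asl i) (pvSS asl j)).length : Int))
        ↔ (2 ≤ (PySem.Set.inter (pvSS asl i) (pvSS asl j)).length) := by
      omega
    rw [if_congr hiff rfl rfl]

-- ===== VERDICT (by name: the statement is the Claim_ definition above) =====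
theorem initial_clusters_spec : Claim_equal_initial_clusters := by
  intro asl _
  unfold Spec_initial_clusters
  rw [pvA_eq_tail, pvB_eq_tail, pv_graph_eq]
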